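-- pv_equiv track=rewrite | github.com/MIQUEL-LOPEZ-ESCORIZA/olympIA | acta_augmentation.py | correct_diccionary
-- ===== SOURCE A (Python) =====
-- def correct_diccionary(original_dict):
--     new_dict = {}
--
--     min_key = min(original_dict.keys())
--     max_key = max(original_dict.keys())
--
--     # Iterate through the range of numbers from min_key to max_key
--     for num in range(min_key, max_key + 1):
--         # Check if the number exists in the original dictionary
--         if num in original_dict:
--             # Add the number and its corresponding value to the new dictionary
--             new_dict[num] = original_dict[num]
--         else:
--             # Find the previous key in the original dictionary
--             prev_key = num - 1
--             while prev_key not in original_dict: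
--                 prev_key -= 1
--
--             # Increment the value of the previous key and add the number to the new dictionary
--             new_dict[num] = original_dict[prev_key] + 1
--     return new_dict
-- ===== SOURCE B (Python) =====
-- def correct_diccionary(original_dict):
--     keys = original_dict.keys()
--     lo = min(keys)
--     hi = max(keys)
--     new_dict = {}
--     last = 0  # overwritten at num == lo, which is always a present key
--     for num in range(lo, hi + 1):
--         if num in original_dict:
--             last = original_dict[num]
--             new_dict[num] = last
--         else:
--             new_dict[num] = last + 1
--     return new_dict
-- ===== Notes on version B (the rewrite author's own statement) =====
-- stated objective: faster
-- what changed: Replaced the inner backward while-scan for the previous present key by a single forward pass carrying the value of the most recent present key, so each missing key is filled in O(1).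
import Mathlib
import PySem

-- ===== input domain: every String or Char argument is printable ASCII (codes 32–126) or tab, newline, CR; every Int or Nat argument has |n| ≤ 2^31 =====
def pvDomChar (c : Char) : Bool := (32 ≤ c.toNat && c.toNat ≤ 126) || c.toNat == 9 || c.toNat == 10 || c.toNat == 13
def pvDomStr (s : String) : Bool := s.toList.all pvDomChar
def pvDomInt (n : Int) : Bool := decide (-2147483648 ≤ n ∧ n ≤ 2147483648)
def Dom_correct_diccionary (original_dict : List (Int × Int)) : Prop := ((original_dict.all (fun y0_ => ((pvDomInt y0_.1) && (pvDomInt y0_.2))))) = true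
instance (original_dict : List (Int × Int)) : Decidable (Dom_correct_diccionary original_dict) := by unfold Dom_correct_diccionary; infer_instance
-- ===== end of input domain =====

-- B replaces A's inner backward while-scan by a single forward pass carrying the value
-- of the most recent present key (objective: faster, asymptotic on the key range).

-- ===== PORT A =====
-- the 'while prev_key not in original_dict: prev_key -= 1' loop; fuel only makes the
-- recursion structural (fuel (num-lo).toNat always suffices since lo is a present key)
def findPrevA (d : PySem.Dict Int Int) (k : Int) : Nat → Option Int
  | 0 => none
  | f + 1 => if (d.get? k).isSome then some k else findPrevA d (k - 1) f

def correct_diccionary (original_dict : List (Int × Int)) : List (Int × Int) :=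
  let od : PySem.Dict Int Int := PySem.Dict.mk original_dict
  match PySem.List.min? od.keys (fun x => x), PySem.List.max? od.keys (fun x => x) with
  | some lo, some hi =>
      ((PySem.List.pyRange lo (hi + 1) 1).foldl (fun new_dict num =>
          match od.get? num with
          | some v => new_dict.insert num v
          | none =>
            match findPrevA od (num - 1) (num - lo).toNat with
            | some k => new_dict.insert num (od.getD k 0 + 1)
            | none => new_dict)  -- unreachable: Python's while loop always finds lo
        PySem.Dict.empty).items
  | _, _ => []  -- unreachable: empty dict raises ValueError (excluded by Pre_)

-- ===== PORT B =====
def correct_diccionary_alt (original_dict : List (Int × Int)) : List (Int × Int) :=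
  let od : PySem.Dict Int Int := PySem.Dict.mk original_dict
  match PySem.List.min? od.keys (fun x => x) with
  | none => []  -- unreachable under Pre_: empty dict raises ValueError in min()
  | some lo =>
    match PySem.List.max? od.keys (fun x => x) with
    | none => []
    | some hi =>
      ((PySem.List.pyRange lo (hi + 1) 1).foldl (fun (st : Int × PySem.Dict Int Int) num =>
          if od.contains num then
            (od.getD num 0, st.2.insert num (od.getD num 0))
          else
            (st.1, st.2.insert num (st.1 + 1)))
        (0, PySem.Dict.empty)).2.items

-- ===== PRECONDITION & SPEC =====
-- Pre_ excludes only the empty dict, on which Python's min() raises ValueError.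
def Pre_correct_diccionary (original_dict : List (Int × Int)) : Prop := original_dict ≠ []
instance (original_dict : List (Int × Int)) : Decidable (Pre_correct_diccionary original_dict) := by unfold Pre_correct_diccionary; infer_instance
def pvWitness_correct_diccionary : (List (Int × Int)) := [(1, 5), (3, 7)]

def Spec_correct_diccionary (original_dict : List (Int × Int)) (out : List (Int × Int)) : Prop := out = correct_diccionary_alt original_dict
instance (original_dict : List (Int × Int)) (out : List (Int × Int)) : Decidable (Spec_correct_diccionary original_dict out) := by unfold Spec_correct_diccionary; infer_instance

-- ===== CLAIM (what is proved, stated in full; the proofs are below) =====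
def Claim_equal_correct_diccionary : Prop := ∀ (original_dict : List (Int × Int)), Dom_correct_diccionary original_dict → Pre_correct_diccionary original_dict → Spec_correct_diccionary original_dict (correct_diccionary original_dict)

-- ===== LEMMAS AND PROOFS =====

-- step functions, named for the proofs
def stepA (od : PySem.Dict Int Int) (lo : Int) (acc : PySem.Dict Int Int) (num : Int) : PySem.Dict Int Int :=
  match od.get? num with
  | some v => acc.insert num v
  | none =>
    match findPrevA od (num - 1) (num - lo).toNat with
    | some k => acc.insert num (od.getD k 0 + 1)
    | none => acc

def stepB (od : PySem.Dict Int Int) (st : Int × PySem.Dict Int Int) (num : Int) : Int × PySem.Dict Int Int :=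
  if od.contains num then
    (od.getD num 0, st.2.insert num (od.getD num 0))
  else
    (st.1, st.2.insert num (st.1 + 1))

-- fuel monotonicity / success of findPrevA
theorem findPrevA_present (od : PySem.Dict Int Int) (k : Int) (f : Nat)
    (h : (od.get? k).isSome) : findPrevA od k (f + 1) = some k := by
  simp [findPrevA, h]

theorem findPrevA_absent (od : PySem.Dict Int Int) (k : Int) (f : Nat)
    (h : od.get? k = none) : findPrevA od k (f + 1) = findPrevA od (k - 1) f := by
  simp [findPrevA, h]

-- the invariant carried along the forward pass:
-- PVInv od lo b last : any sufficient fuel makes findPrevA from b return a key whose value is last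
def PVInv (od : PySem.Dict Int Int) (lo b last : Int) : Prop :=
  ∀ f : Nat, (b - lo).toNat < f → ∃ k, findPrevA od b f = some k ∧ od.getD k 0 = last

theorem main_inv (od : PySem.Dict Int Int) (lo : Int)
    (hlo : (od.get? lo).isSome) : ∀ n : Nat, ∀ b : Int, b = lo + n →
    ∃ last acc,
      (PySem.List.pyRange lo (b + 1) 1).foldl (stepB od) (0, PySem.Dict.empty) = (last, acc) ∧
      (PySem.List.pyRange lo (b + 1) 1).foldl (stepA od lo) PySem.Dict.empty = acc ∧
      PVInv od lo b last := by
  intro n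
  induction n with
  | zero =>
    intro b hb
    obtain ⟨v, hv⟩ := Option.isSome_iff_exists.mp hlo
    have hb' : lo = b := by omega
    subst hb'
    refine ⟨v, PySem.Dict.empty.insert lo v, ?_, ?_, ?_⟩
    · rw [PySem.List.pyRange_one_singleton]
      simp [stepB, PySem.Dict.contains_eq_isSome_get?, hv,
        PySem.Dict.getD_of_get?_eq_some od 0 hv]
    · rw [PySem.List.pyRange_one_singleton]
      simp [stepA, hv]
    · intro f hf
      obtain ⟨f', rfl⟩ : ∃ f', f = f' + 1 := ⟨f - 1, by omega⟩
      exact ⟨lo, by simpa using findPrevA_present od lo f' hlo,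
        PySem.Dict.getD_of_get?_eq_some od 0 hv⟩
  | succ m ih =>
    intro b hb
    have hlob : lo ≤ b - 1 := by omega
    obtain ⟨last, acc, hB, hA, hInv⟩ := ih (b - 1) (by push_cast at hb ⊢; omega)
    have hsplit : PySem.List.pyRange lo (b + 1) 1
        = PySem.List.pyRange lo ((b - 1) + 1) 1 ++ [b] := by
      have h1 : (b - 1) + 1 = b := by ring
      rw [h1, PySem.List.pyRange_one_succ_right (by omega)]
    have hfuel : (b - lo).toNat = m + 1 := by omega
    cases hnum : od.get? b with
    | some v =>
      refine ⟨v, acc.insert b v, ?_, ?_, ?_⟩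
      · rw [hsplit, List.foldl_append, hB]
        simp [stepB, PySem.Dict.contains_eq_isSome_get?, hnum,
          PySem.Dict.getD_of_get?_eq_some od 0 hnum]
      · rw [hsplit, List.foldl_append, hA]
        simp [stepA, hnum]
      · intro f hf
        obtain ⟨f', rfl⟩ : ∃ f', f = f' + 1 := ⟨f - 1, by omega⟩
        exact ⟨b, findPrevA_present od b f' (by rw [hnum]; rfl),
          PySem.Dict.getD_of_get?_eq_some od 0 hnum⟩
    | none =>
      obtain ⟨k, hk, hkval⟩ := hInv (m + 1) (by omega)
      have hprev : findPrevA od (b - 1) (b - lo).toNat = some k := by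
        rw [hfuel]; exact hk
      refine ⟨last, acc.insert b (last + 1), ?_, ?_, ?_⟩
      · rw [hsplit, List.foldl_append, hB]
        simp [stepB, PySem.Dict.contains_eq_isSome_get?, hnum]
      · rw [hsplit, List.foldl_append, hA]
        simp only [List.foldl_cons, List.foldl_nil, stepA, hnum, hprev, hkval]
      · intro f hf
        obtain ⟨f', rfl⟩ : ∃ f', f = f' + 1 := ⟨f - 1, by omega⟩
        rw [findPrevA_absent od b f' hnum]
        exact hInv f' (by omega)

theorem correct_diccionary_spec : Claim_equal_correct_diccionary := by
  intro od _ hpre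
  unfold Spec_correct_diccionary correct_diccionary correct_diccionary_alt
  have hkeys : (PySem.Dict.mk od : PySem.Dict Int Int).keys ≠ [] := by
    cases od with
    | nil => exact absurd rfl hpre
    | cons p t => simp [PySem.Dict.keys]
  obtain ⟨lo, hlo⟩ : ∃ lo, PySem.List.min? (PySem.Dict.mk od : PySem.Dict Int Int).keys (fun x => x) = some lo := by
    cases h : PySem.List.min? (PySem.Dict.mk od : PySem.Dict Int Int).keys (fun x => x) with
    | none => exact absurd ((PySem.List.min?_eq_none_iff _ _).mp h) hkeys
    | some m => exact ⟨m, rfl⟩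
  obtain ⟨hi, hhi⟩ : ∃ hi, PySem.List.max? (PySem.Dict.mk od : PySem.Dict Int Int).keys (fun x => x) = some hi := by
    cases h : PySem.List.max? (PySem.Dict.mk od : PySem.Dict Int Int).keys (fun x => x) with
    | none => exact absurd ((PySem.List.max?_eq_none_iff _ _).mp h) hkeys
    | some m => exact ⟨m, rfl⟩
  have hle : lo ≤ hi := PySem.List.min?_isMin hlo hi (PySem.List.max?_mem hhi)
  have hget : ((PySem.Dict.mk od : PySem.Dict Int Int).get? lo).isSome := by
    rw [Option.isSome_iff_ne_none]
    intro h
    exact ((PySem.Dict.get?_eq_none_iff_not_mem_keys _ _).mp h) (PySem.List.min?_mem hlo)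
  obtain ⟨last, acc, hB, hA, -⟩ :=
    main_inv (PySem.Dict.mk od) lo hget (hi - lo).toNat hi (by omega)
  simp only [hlo, hhi]
  show ((PySem.List.pyRange lo (hi + 1) 1).foldl (stepA (PySem.Dict.mk od) lo) PySem.Dict.empty).items
      = (((PySem.List.pyRange lo (hi + 1) 1).foldl (stepB (PySem.Dict.mk od)) (0, PySem.Dict.empty)).2).items
  rw [hA, hB]
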